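-- pv_equiv track=rewrite | github.com/Kavaldrin/AoC2018 | 2/_2.py | taskA
-- ===== SOURCE A (Python) =====
-- from collections import Counter
--
-- def taskA(data):
--     twos = 0
--     threes = 0
--     for line in data:
--         counter = [j for i,j in Counter(line).most_common()]
--         if 3 in counter:
--             twos+=1
--         if 2 in counter:
--             threes+=1
--     return twos*threes
-- ===== SOURCE B (Python) =====
-- def _run_flags(s):
--     # s: sorted list of characters; returns (has a run of length 2, has a run of length 3)
--     has2 = False
--     has3 = False
--     i = 0
--     n = len(s)
--     while i < n:
--         j = i
--         while j < n and s[j] == s[i]: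
--             j += 1
--         run = j - i
--         has2 = has2 or run == 2
--         has3 = has3 or run == 3
--         i = j
--     return has2, has3
--
--
-- def taskA(data):
--     twos = 0
--     threes = 0
--     for line in data:
--         has2, has3 = _run_flags(sorted(line))
--         if has3:
--             twos += 1
--         if has2:
--             threes += 1
--     return twos * threes
-- ===== Notes on version B (the rewrite author's own statement) =====
-- stated objective: alternative
-- what changed: Per line, replaces hash-table counting (Counter + most_common sort of the counts) by sort-then-scan: sort the characters and scan contiguous runs in one pass, flagging run lengths 2 and 3.
import Mathlib
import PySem

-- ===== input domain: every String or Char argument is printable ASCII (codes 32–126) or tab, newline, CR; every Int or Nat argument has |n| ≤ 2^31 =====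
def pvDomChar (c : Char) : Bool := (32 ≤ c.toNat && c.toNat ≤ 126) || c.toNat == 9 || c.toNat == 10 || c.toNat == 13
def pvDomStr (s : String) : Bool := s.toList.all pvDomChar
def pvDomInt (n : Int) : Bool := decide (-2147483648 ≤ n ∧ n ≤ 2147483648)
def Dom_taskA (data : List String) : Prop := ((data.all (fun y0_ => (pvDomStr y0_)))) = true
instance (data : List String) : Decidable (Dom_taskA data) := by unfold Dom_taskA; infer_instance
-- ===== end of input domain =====

-- B replaces per-line hash counting (Counter + most_common) by sort-then-run-scan; same results, alternative algorithm.

-- ===== PORT A =====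
-- counter = [j for i,j in Counter(line).most_common()]  (most_common = items sorted by count, descending, stable)
def taskA (data : List String) : Int :=
  let r := data.foldl (fun (st : Int × Int) line =>
    let counter := (PySem.List.sorted (PySem.Dict.counter line.toList).items (fun kv => kv.2) true).map (fun kv => kv.2)
    let st := if (3 : Int) ∈ counter then (st.1 + 1, st.2) else st
    if (2 : Int) ∈ counter then (st.1, st.2 + 1) else st) (0, 0)
  r.1 * r.2

-- ===== PORT B =====
-- _run_flags: scan a sorted char list run by run; the inner 'while s[j] == s[i]' is the takeWhile/dropWhile split
def runFlags : List Char → Bool × Bool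
  | [] => (false, false)
  | c :: rest =>
    let run := (rest.takeWhile (fun d => d == c)).length + 1
    let r := runFlags (rest.dropWhile (fun d => d == c))
    (r.1 || decide (run = 2), r.2 || decide (run = 3))
termination_by s => s.length
decreasing_by
  simpa using Nat.lt_succ_of_le (List.length_dropWhile_le _ _)

def taskA_alt (data : List String) : Int :=
  let r := data.foldl (fun (st : Int × Int) line =>
    let f := runFlags (PySem.List.sorted line.toList (fun c => c) false)
    ((if f.2 then st.1 + 1 else st.1), (if f.1 then st.2 + 1 else st.2))) (0, 0)
  r.1 * r.2

-- ===== PRECONDITION & SPEC =====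
def Spec_taskA (data : List String) (out : Int) : Prop := out = taskA_alt data
instance (data : List String) (out : Int) : Decidable (Spec_taskA data out) := by unfold Spec_taskA; infer_instance

-- ===== CLAIM (what is proved, stated in full; the proofs are below) =====
def Claim_equal_taskA : Prop := ∀ (data : List String), Dom_taskA data → Spec_taskA data (taskA data)

-- ===== LEMMAS AND PROOFS =====

-- A-side: n is among the most_common counts iff some character occurs exactly n times
lemma mem_mcVals (cs : List Char) (n : Int) :
    (n ∈ (PySem.List.sorted (PySem.Dict.counter cs).items (fun kv => kv.2) true).map (fun kv => kv.2))
      ↔ ∃ c ∈ cs, (cs.count c : Int) = n := by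
  rw [List.mem_map]
  constructor
  · rintro ⟨kv, hkv, rfl⟩
    rw [PySem.List.mem_sorted, PySem.Dict.items_counter, List.mem_map] at hkv
    obtain ⟨c, hc, rfl⟩ := hkv
    exact ⟨c, (PySem.Set.mem_ofList _ _).mp hc, rfl⟩
  · rintro ⟨c, hc, rfl⟩
    refine ⟨(c, (cs.count c : Int)), ?_, rfl⟩
    rw [PySem.List.mem_sorted, PySem.Dict.items_counter, List.mem_map]
    exact ⟨c, (PySem.Set.mem_ofList _ _).mpr hc, rfl⟩

-- every element of dropWhile (· == c) in a sorted list headed by c is ≠ c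
lemma ne_of_mem_dropWhile_sorted {c : Char} {rest : List Char}
    (hs : (c :: rest).Pairwise (· ≤ ·)) :
    ∀ x ∈ rest.dropWhile (fun d => d == c), x ≠ c := by
  intro x hx
  have hsub : (rest.dropWhile (fun d => d == c)).Sublist rest := List.dropWhile_sublist _
  have hrest : rest.Pairwise (· ≤ ·) := hs.of_cons
  have hcle : ∀ y ∈ rest, c ≤ y := fun y hy => (List.pairwise_cons.mp hs).1 y hy
  cases hdw : rest.dropWhile (fun d => d == c) with
  | nil => simp [hdw] at hx
  | cons h t =>
    have hhne : ¬ ((h == c) = true) := by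
      have := List.head?_dropWhile_not (fun d => d == c) rest
      rw [hdw] at this; simpa using this
    have hhne' : h ≠ c := by simpa using hhne
    have hhmem : h ∈ rest := (hdw ▸ hsub).subset (List.mem_cons_self ..)
    have hch : c < h := lt_of_le_of_ne (hcle h hhmem) (Ne.symm hhne')
    rw [hdw] at hx
    rcases List.mem_cons.mp hx with rfl | hxt
    · exact hhne'
    · have hsorted' : (h :: t).Pairwise (· ≤ ·) := hrest.sublist (hdw ▸ hsub)
      have : h ≤ x := (List.pairwise_cons.mp hsorted').1 x hxt
      exact fun h' => absurd (h' ▸ this) (not_le.mpr hch)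

-- count of the head in a sorted list = 1 + length of the leading run
lemma count_head_sorted {c : Char} {rest : List Char}
    (hs : (c :: rest).Pairwise (· ≤ ·)) :
    (c :: rest).count c = (rest.takeWhile (fun d => d == c)).length + 1 := by
  have hsplit : rest = rest.takeWhile (fun d => d == c) ++ rest.dropWhile (fun d => d == c) :=
    (List.takeWhile_append_dropWhile (p := fun d => d == c) (l := rest)).symm
  have h1 : (rest.takeWhile (fun d => d == c)).count c
      = (rest.takeWhile (fun d => d == c)).length := by
    rw [List.count_eq_length]
    intro b hb
    have hbc : b = c := by simpa using List.mem_takeWhile_imp hb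
    simp [hbc]
  have h2 : (rest.dropWhile (fun d => d == c)).count c = 0 :=
    List.count_eq_zero.mpr (fun hmem => ne_of_mem_dropWhile_sorted hs c hmem rfl)
  calc (c :: rest).count c = rest.count c + 1 := by simp
    _ = (rest.takeWhile (fun d => d == c)).length + 1 := by
        conv_lhs => rw [hsplit]
        rw [List.count_append, h1, h2]

-- count of a non-head element lives entirely in the dropWhile part
lemma count_ne_head_sorted {c x : Char} {rest : List Char} (hx : x ≠ c) :
    (c :: rest).count x = (rest.dropWhile (fun d => d == c)).count x := by
  have hsplit : rest = rest.takeWhile (fun d => d == c) ++ rest.dropWhile (fun d => d == c) :=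
    (List.takeWhile_append_dropWhile (p := fun d => d == c) (l := rest)).symm
  have h1 : (rest.takeWhile (fun d => d == c)).count x = 0 := by
    rw [List.count_eq_zero]
    intro hmem
    have := List.mem_takeWhile_imp hmem
    exact hx (by simpa using this)
  calc (c :: rest).count x = rest.count x := by
        simp [(Ne.symm hx : c ≠ x)]
    _ = _ := by
        conv_lhs => rw [hsplit]
        rw [List.count_append, h1, Nat.zero_add]

-- B-side characterisation: on a sorted list, the run flags say "some char occurs exactly 2 / exactly 3 times"
lemma runFlags_iff (s : List Char) (hs : s.Pairwise (· ≤ ·)) :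
    ((runFlags s).1 = true ↔ ∃ c ∈ s, s.count c = 2)
      ∧ ((runFlags s).2 = true ↔ ∃ c ∈ s, s.count c = 3) := by
  induction s using runFlags.induct with
  | case1 => simp [runFlags]
  | case2 c rest ih =>
    have hdrop : (rest.dropWhile (fun d => d == c)).Pairwise (· ≤ ·) :=
      hs.of_cons.sublist (List.dropWhile_sublist _)
    obtain ⟨ih2, ih3⟩ := ih hdrop
    have hdropsub : (rest.dropWhile (fun d => d == c)).Sublist rest := List.dropWhile_sublist _
    have hkey : ∀ n : Nat, ((rest.takeWhile (fun d => d == c)).length + 1 = n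
        ∨ ∃ x ∈ rest.dropWhile (fun d => d == c), (rest.dropWhile (fun d => d == c)).count x = n)
        ↔ ∃ x ∈ c :: rest, (c :: rest).count x = n := by
      intro n
      constructor
      · rintro (h | ⟨x, hx, hcx⟩)
        · exact ⟨c, List.mem_cons_self .., by rw [count_head_sorted hs]; exact h⟩
        · refine ⟨x, List.mem_cons_of_mem _ (hdropsub.subset hx), ?_⟩
          rw [count_ne_head_sorted (ne_of_mem_dropWhile_sorted hs x hx)]
          exact hcx
      · rintro ⟨x, hx, hcx⟩
        rcases List.mem_cons.mp hx with rfl | hxrest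
        · left; rw [count_head_sorted hs] at hcx; exact hcx
        · by_cases hxc : x = c
          · subst hxc
            left; rw [count_head_sorted hs] at hcx; exact hcx
          · right
            have hxmem : x ∈ rest.dropWhile (fun d => d == c) := by
              have hsplit : rest = rest.takeWhile (fun d => d == c)
                  ++ rest.dropWhile (fun d => d == c) :=
                (List.takeWhile_append_dropWhile (p := fun d => d == c) (l := rest)).symm
              rw [hsplit] at hxrest
              rcases List.mem_append.mp hxrest with htk | hdr
              · exact absurd (by simpa using List.mem_takeWhile_imp htk) hxc
              · exact hdr
            refine ⟨x, hxmem, ?_⟩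
            rw [count_ne_head_sorted hxc] at hcx
            exact hcx
    constructor
    · rw [show (runFlags (c :: rest)).1
          = ((runFlags (rest.dropWhile (fun d => d == c))).1
              || decide ((rest.takeWhile (fun d => d == c)).length + 1 = 2)) by
            rw [runFlags]]
      rw [Bool.or_eq_true, ih2, decide_eq_true_iff, or_comm]
      exact hkey 2
    · rw [show (runFlags (c :: rest)).2
          = ((runFlags (rest.dropWhile (fun d => d == c))).2
              || decide ((rest.takeWhile (fun d => d == c)).length + 1 = 3)) by
            rw [runFlags]]
      rw [Bool.or_eq_true, ih3, decide_eq_true_iff, or_comm]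
      exact hkey 3

-- per-line agreement of the two membership tests
lemma line_flag (cs : List Char) (n : Nat) :
    ((n : Int) ∈ (PySem.List.sorted (PySem.Dict.counter cs).items (fun kv => kv.2) true).map (fun kv => kv.2))
      ↔ (∃ c ∈ PySem.List.sorted cs (fun c => c) false,
            (PySem.List.sorted cs (fun c => c) false).count c = n) := by
  rw [mem_mcVals]
  have hperm : (PySem.List.sorted cs (fun c => c) false).Perm cs := PySem.List.sorted_perm ..
  constructor
  · rintro ⟨c, hc, hcn⟩
    exact ⟨c, hperm.mem_iff.mpr hc, by rw [hperm.count_eq]; exact_mod_cast hcn⟩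
  · rintro ⟨c, hc, hcn⟩
    refine ⟨c, hperm.mem_iff.mp hc, ?_⟩
    rw [hperm.count_eq] at hcn
    exact_mod_cast hcn

lemma step_eq (st : Int × Int) (line : String) :
    (if (2 : Int) ∈ (PySem.List.sorted (PySem.Dict.counter line.toList).items (fun kv => kv.2) true).map (fun kv => kv.2) then
       ((if (3 : Int) ∈ (PySem.List.sorted (PySem.Dict.counter line.toList).items (fun kv => kv.2) true).map (fun kv => kv.2) then (st.1 + 1, st.2) else st).1,
        (if (3 : Int) ∈ (PySem.List.sorted (PySem.Dict.counter line.toList).items (fun kv => kv.2) true).map (fun kv => kv.2) then (st.1 + 1, st.2) else st).2 + 1)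
     else
       (if (3 : Int) ∈ (PySem.List.sorted (PySem.Dict.counter line.toList).items (fun kv => kv.2) true).map (fun kv => kv.2) then (st.1 + 1, st.2) else st))
    = ((if (runFlags (PySem.List.sorted line.toList (fun c => c) false)).2 = true then st.1 + 1 else st.1),
       (if (runFlags (PySem.List.sorted line.toList (fun c => c) false)).1 = true then st.2 + 1 else st.2)) := by
  have hsorted : (PySem.List.sorted line.toList (fun c => c) false).Pairwise (· ≤ ·) :=
    PySem.List.sorted_pairwise ..
  obtain ⟨h2, h3⟩ := runFlags_iff _ hsorted
  have e3 : ((3 : Int) ∈ (PySem.List.sorted (PySem.Dict.counter line.toList).items (fun kv => kv.2) true).map (fun kv => kv.2))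
      ↔ (runFlags (PySem.List.sorted line.toList (fun c => c) false)).2 = true := by
    rw [h3]; exact_mod_cast line_flag line.toList 3
  have e2 : ((2 : Int) ∈ (PySem.List.sorted (PySem.Dict.counter line.toList).items (fun kv => kv.2) true).map (fun kv => kv.2))
      ↔ (runFlags (PySem.List.sorted line.toList (fun c => c) false)).1 = true := by
    rw [h2]; exact_mod_cast line_flag line.toList 2
  by_cases c3 : (runFlags (PySem.List.sorted line.toList (fun c => c) false)).2 = true <;>
  by_cases c2 : (runFlags (PySem.List.sorted line.toList (fun c => c) false)).1 = true <;>
  simp [e3, e2, c3, c2]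

-- ===== VERDICT (by name: the statement is the Claim_ definition above) =====
theorem taskA_spec : Claim_equal_taskA := by
  intro data _
  unfold Spec_taskA taskA taskA_alt
  simp only [step_eq]
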